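-- pv_equiv track=rewrite | github.com/amol-ship-it/agi-core | domains/arc/transformation_primitives.py | extend_up
-- ===== SOURCE A (Python) =====
-- Grid = list[list[int]]
--
-- def extend_up(grid: Grid) -> Grid:
--     """Each non-zero pixel extends upward, filling zeros until hitting another non-zero.
--
--     Scan bottom-to-top so upper pixels don't overwrite each other.
--     """
--     if not grid or not grid[0]:
--         return grid
--     h, w = len(grid), len(grid[0])
--     result = [row[:] for row in grid]
--     for r in range(h - 2, -1, -1):
--         for c in range(w):
--             if result[r][c] == 0 and result[r + 1][c] != 0:
--                 result[r][c] = result[r + 1][c]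
--     return result
-- ===== SOURCE B (Python) =====
-- Grid = list[list[int]]
--
-- def extend_up(grid: Grid) -> Grid:
--     """Column-wise propagation: thread a scalar carry up each column instead of
--     reading the neighbouring computed cell row by row."""
--     if not grid or not grid[0]:
--         return grid
--     h, w = len(grid), len(grid[0])
--     result = [row[:] for row in grid]
--     for c in range(w):
--         carry = 0
--         for r in range(h - 1, -1, -1):
--             v = result[r][c]
--             if v != 0:
--                 carry = v
--             else:
--                 result[r][c] = carry
--     return result
-- ===== Notes on version B (the rewrite author's own statement) =====
-- stated objective: alternative
-- what changed: Replaces the row-major scan that fills each zero from the adjacent already-computed cell below (result[r+1][c]) with a column-major pass that threads a scalar carry accumulator bottom-to-top through each column.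
-- outside the precondition, e.g. on extend_up([[0, 0], [5]]): A raises IndexError, B raises IndexError; on extend_up([[1, 1], [5]]): A returns [[1, 1], [5]], B raises IndexError
import Mathlib
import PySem

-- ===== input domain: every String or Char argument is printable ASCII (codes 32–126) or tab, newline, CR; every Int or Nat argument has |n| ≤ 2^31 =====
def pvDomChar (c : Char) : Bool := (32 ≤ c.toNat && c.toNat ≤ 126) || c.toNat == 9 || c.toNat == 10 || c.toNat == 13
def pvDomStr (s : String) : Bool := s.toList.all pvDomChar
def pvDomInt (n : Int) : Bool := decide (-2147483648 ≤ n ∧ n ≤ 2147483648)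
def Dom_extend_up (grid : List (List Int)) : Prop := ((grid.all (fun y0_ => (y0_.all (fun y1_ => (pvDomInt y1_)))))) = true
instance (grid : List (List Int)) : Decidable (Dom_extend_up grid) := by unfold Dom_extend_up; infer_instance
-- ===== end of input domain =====

-- B replaces A's row-major neighbour-read propagation by a column-major pass with a scalar
-- carry accumulator (alternative decomposition, same asymptotic cost).

-- shared cell accessors: Python's result[r][c] read / result[r][c] = v write (indices are
-- nonnegative and in range on every admitted input, so the getD/set forms are exact there)
def pvGetCell (g : List (List Int)) (r c : Nat) : Int := (g.getD r []).getD c 0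
def pvSetCell (g : List (List Int)) (r c : Nat) (v : Int) : List (List Int) :=
  g.set r ((g.getD r []).set c v)

-- ===== PORT A =====
def extend_up (grid : List (List Int)) : List (List Int) :=
  if grid = [] ∨ grid.headD [] = [] then grid
  else
    let h := grid.length
    let w := (grid.headD []).length
    let result := grid.map (fun row => row)
    (PySem.List.pyRange ((h : Int) - 2) (-1) (-1)).foldl
      (fun g r =>
        (PySem.List.pyRange 0 (w : Int) 1).foldl
          (fun g c =>
            if pvGetCell g r.toNat c.toNat = 0 ∧ pvGetCell g (r.toNat + 1) c.toNat ≠ 0 then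
              pvSetCell g r.toNat c.toNat (pvGetCell g (r.toNat + 1) c.toNat)
            else g)
          g)
      result

-- ===== PORT B =====
def extend_up_alt (grid : List (List Int)) : List (List Int) :=
  if grid = [] ∨ grid.headD [] = [] then grid
  else
    let h := grid.length
    let w := (grid.headD []).length
    let result := grid.map (fun row => row)
    (PySem.List.pyRange 0 (w : Int) 1).foldl
      (fun g c =>
        ((PySem.List.pyRange ((h : Int) - 1) (-1) (-1)).foldl
          (fun (s : List (List Int) × Int) r =>
            let v := pvGetCell s.1 r.toNat c.toNat
            if v ≠ 0 then (s.1, v) else (pvSetCell s.1 r.toNat c.toNat s.2, s.2))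
          (g, 0)).1)
      result

-- ===== PRECONDITION & SPEC =====
-- Pre_ excludes ragged grids having a row shorter than the first row: there A usually raises
-- IndexError, and when every probed cell happens to be nonzero it accidentally returns the
-- ragged grid with the short rows untouched — an artefact of its short-circuit condition;
-- B raises IndexError on such grids.
def Pre_extend_up (grid : List (List Int)) : Prop :=
  ∀ row ∈ grid, (grid.headD []).length ≤ row.length
instance (grid : List (List Int)) : Decidable (Pre_extend_up grid) := by
  unfold Pre_extend_up; infer_instance
def pvWitness_extend_up : List (List Int) := [[1, 0], [0, 2]]
def Spec_extend_up (grid : List (List Int)) (out : List (List Int)) : Prop := out = extend_up_alt grid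
instance (grid : List (List Int)) (out : List (List Int)) : Decidable (Spec_extend_up grid out) := by unfold Spec_extend_up; infer_instance

-- ===== CLAIM (what is proved, stated in full; the proofs are below) =====
def Claim_equal_extend_up : Prop := ∀ (grid : List (List Int)), Dom_extend_up grid → Pre_extend_up grid → Spec_extend_up grid (extend_up grid)

-- ===== LEMMAS AND PROOFS =====

-- the value a cell (r,c) holds after propagation: the cell itself if nonzero, else the
-- first nonzero strictly below it in column c, else 0
def pvDown (grid : List (List Int)) (c : Nat) (r : Nat) : Int :=
  if grid.length ≤ r then 0
  else if pvGetCell grid r c ≠ 0 then pvGetCell grid r c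
  else pvDown grid c (r + 1)
termination_by grid.length - r

-- proof-side names for the two loop bodies
def pvStepA (r : Nat) (g : List (List Int)) (c : Nat) : List (List Int) :=
  if pvGetCell g r c = 0 ∧ pvGetCell g (r + 1) c ≠ 0 then
    pvSetCell g r c (pvGetCell g (r + 1) c)
  else g

def pvRowA (w : Nat) (g : List (List Int)) (r : Nat) : List (List Int) :=
  (List.range w).foldl (pvStepA r) g

def pvStepB (c : Nat) (s : List (List Int) × Int) (r : Nat) : List (List Int) × Int :=
  let v := pvGetCell s.1 r c
  if v ≠ 0 then (s.1, v) else (pvSetCell s.1 r c s.2, s.2)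

def pvColB (h : Nat) (g : List (List Int)) (c : Nat) : List (List Int) :=
  ((List.range h).foldl (fun s k => pvStepB c s (h - 1 - k)) (g, 0)).1

theorem pv_len_setCell (g : List (List Int)) (r c : Nat) (v : Int) :
    (pvSetCell g r c v).length = g.length := by
  simp [pvSetCell]

theorem pv_rowlen_setCell (g : List (List Int)) (r c : Nat) (v : Int) (i : Nat) :
    ((pvSetCell g r c v).getD i []).length = (g.getD i []).length := by
  simp only [pvSetCell, List.getD_eq_getElem?_getD]
  rcases eq_or_ne i r with rfl | hir
  · by_cases hr : i < g.length
    · simp [hr]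
    · simp [hr]
  · simp [List.getElem?_set_ne (by omega : r ≠ i)]

theorem pv_getCell_setCell (g : List (List Int)) (r c : Nat) (v : Int) (i c' : Nat) :
    pvGetCell (pvSetCell g r c v) i c' =
      if r = i ∧ c = c' ∧ r < g.length ∧ c < (g.getD r []).length then v
      else pvGetCell g i c' := by
  simp only [pvGetCell, pvSetCell, List.getD_eq_getElem?_getD]
  rcases eq_or_ne r i with rfl | hir
  · by_cases hr : r < g.length
    · simp only [List.getElem?_set_self', hr]
      simp only [List.getElem?_eq_getElem hr, Option.getD_some]
      rcases eq_or_ne c c' with rfl | hcc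
      · by_cases hcl : c < (g.getD r []).length
        · simp [List.getD_eq_getElem?_getD, List.getElem?_eq_getElem hr] at hcl
          simp [hcl]
        · simp [List.getD_eq_getElem?_getD, List.getElem?_eq_getElem hr] at hcl
          simp [hcl]
      · simp [hcc, List.getElem?_set_ne hcc]
    · simp [hr]
  · simp [hir, List.getElem?_set_ne hir]

theorem pv_grid_eq_of_cells (g g' : List (List Int))
    (hl : g.length = g'.length)
    (hrl : ∀ i, (g.getD i []).length = (g'.getD i []).length)
    (hc : ∀ i c, pvGetCell g i c = pvGetCell g' i c) : g = g' := by
  apply List.ext_getElem hl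
  intro i h1 h2
  apply List.ext_getElem
  · have := hrl i
    simpa [List.getD_eq_getElem?_getD, List.getElem?_eq_getElem h1,
      List.getElem?_eq_getElem h2] using this
  · intro c hc1 hc2
    have := hc i c
    simpa [pvGetCell, List.getD_eq_getElem?_getD, List.getElem?_eq_getElem h1,
      List.getElem?_eq_getElem h2, List.getElem?_eq_getElem hc1,
      List.getElem?_eq_getElem hc2] using this

theorem pvDown_of_ge (grid : List (List Int)) (c r : Nat) (h : grid.length ≤ r) :
    pvDown grid c r = 0 := by
  unfold pvDown; simp [h]

theorem pvDown_of_lt (grid : List (List Int)) (c r : Nat) (h : r < grid.length) :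
    pvDown grid c r =
      if pvGetCell grid r c ≠ 0 then pvGetCell grid r c else pvDown grid c (r + 1) := by
  conv_lhs => rw [pvDown]
  simp [Nat.not_le.mpr h]

-- A's inner loop over the columns of row r, characterised cell by cell
theorem pv_rowA_spec (w : Nat) (g : List (List Int)) (r : Nat)
    (hr : r < g.length) (hw : w ≤ (g.getD r []).length) :
    (pvRowA w g r).length = g.length ∧
    (∀ i, ((pvRowA w g r).getD i []).length = (g.getD i []).length) ∧
    (∀ i c, pvGetCell (pvRowA w g r) i c =
      if i = r ∧ c < w then
        (if pvGetCell g r c = 0 ∧ pvGetCell g (r + 1) c ≠ 0 then pvGetCell g (r + 1) c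
         else pvGetCell g r c)
      else pvGetCell g i c) := by
  induction w with
  | zero => simp [pvRowA]
  | succ w ih =>
    have hw' : w ≤ (g.getD r []).length := by omega
    have hb : w < (g.getD r []).length := hw
    obtain ⟨ih1, ih2, ih3⟩ := ih hw'
    have hstep : pvRowA (w + 1) g r = pvStepA r (pvRowA w g r) w := by
      simp [pvRowA, List.range_succ]
    have hgr : pvGetCell (pvRowA w g r) r w = pvGetCell g r w := by rw [ih3]; simp
    have hgr1 : pvGetCell (pvRowA w g r) (r + 1) w = pvGetCell g (r + 1) w := by
      rw [ih3]; simp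
    have hlen : (pvRowA (w + 1) g r).length = g.length := by
      rw [hstep]; unfold pvStepA; split
      · rw [pv_len_setCell]; exact ih1
      · exact ih1
    have hrowlen : ∀ i, ((pvRowA (w + 1) g r).getD i []).length = (g.getD i []).length := by
      intro i; rw [hstep]; unfold pvStepA; split
      · rw [pv_rowlen_setCell]; exact ih2 i
      · exact ih2 i
    refine ⟨hlen, hrowlen, ?_⟩
    intro i c
    rw [hstep]; unfold pvStepA; rw [hgr, hgr1]
    by_cases hir : i = r
    · rw [hir]
      by_cases hcw : c = w
      · rw [hcw]
        split
        · rename_i hcond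
          rw [pv_getCell_setCell, ih1, ih2]
          have hb2 : w < (g[r]'hr).length := by
            simpa [List.getD_eq_getElem?_getD, List.getElem?_eq_getElem hr] using hb
          simp [hr, hb2]
        · rename_i hcond
          rw [ih3]
          simp
      · split
        · rename_i hcond
          rw [pv_getCell_setCell, ih1, ih2, ih3]
          have hwc : ¬ (w = c) := fun h => hcw h.symm
          by_cases hcw' : c < w
          · have h1 : c < w + 1 := by omega
            simp [hwc, hcw', h1]
          · have h1 : ¬ c < w + 1 := by omega
            simp [hwc, hcw', h1]
        · rw [ih3]
          by_cases hcw' : c < w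
          · have h1 : c < w + 1 := by omega
            simp [hcw', h1]
          · have h1 : ¬ c < w + 1 := by omega
            simp [hcw', h1]
    · split
      · rw [pv_getCell_setCell, ih1, ih2, ih3]
        have h2 : ¬ (r = i) := fun h => hir h.symm
        simp [hir, h2]
      · rw [ih3]; simp [hir]

-- A's outer loop: after m bottom rows have been processed, rows ≥ h-1-m hold pvDown
theorem pv_A_outer (grid : List (List Int)) (m : Nat)
    (hP : ∀ i, i < grid.length → (grid.headD []).length ≤ (grid.getD i []).length)
    (hm : m ≤ grid.length - 1) :
    ((List.range m).foldl (fun g k => pvRowA (grid.headD []).length g (grid.length - 2 - k)) grid).length = grid.length ∧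
    (∀ i, (((List.range m).foldl (fun g k => pvRowA (grid.headD []).length g (grid.length - 2 - k)) grid).getD i []).length = (grid.getD i []).length) ∧
    (∀ i c, pvGetCell ((List.range m).foldl (fun g k => pvRowA (grid.headD []).length g (grid.length - 2 - k)) grid) i c =
      if grid.length - 1 - m ≤ i ∧ c < (grid.headD []).length then pvDown grid c i
      else pvGetCell grid i c) := by
  induction m with
  | zero =>
    refine ⟨by simp, by simp, ?_⟩
    intro i c
    simp only [List.range_zero, List.foldl_nil]
    by_cases hi : grid.length - 1 - 0 ≤ i
    · by_cases hc : c < (grid.headD []).length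
      · rw [if_pos ⟨hi, hc⟩]
        by_cases hlen : i < grid.length
        · rw [pvDown_of_lt grid c i hlen, pvDown_of_ge grid c (i + 1) (by omega)]
          by_cases hz : pvGetCell grid i c = 0 <;> simp [hz]
        · rw [pvDown_of_ge grid c i (by omega)]
          simp [pvGetCell, List.getD_eq_getElem?_getD,
            List.getElem?_eq_none (show grid.length ≤ i by omega)]
      · rw [if_neg (fun h => hc h.2)]
    · rw [if_neg (fun h => hi h.1)]
  | succ m ih =>
    have hm' : m ≤ grid.length - 1 := by omega
    have hh2 : m + 2 ≤ grid.length := by omega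
    obtain ⟨ih1, ih2, ih3⟩ := ih hm'
    set w := (grid.headD []).length with hwdef
    set g := (List.range m).foldl (fun g k => pvRowA w g (grid.length - 2 - k)) grid with hgdef
    set r := grid.length - 2 - m with hrdef
    have hstep : (List.range (m + 1)).foldl (fun g k => pvRowA w g (grid.length - 2 - k)) grid
        = pvRowA w g r := by
      rw [List.range_succ, List.foldl_append]; rfl
    have hrh : r < grid.length := by omega
    obtain ⟨s1, s2, s3⟩ := pv_rowA_spec w g r (by rw [ih1]; exact hrh)
      (by rw [ih2 r]; exact hP r hrh)
    refine ⟨by rw [hstep, s1, ih1], fun i => by rw [hstep, s2 i, ih2 i], ?_⟩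
    intro i c
    rw [hstep, s3]
    by_cases hc : c < w
    · have hgrc : pvGetCell g r c = pvGetCell grid r c := by
        rw [ih3, if_neg (fun h => by omega)]
      have hgr1c : pvGetCell g (r + 1) c = pvDown grid c (r + 1) := by
        rw [ih3, if_pos ⟨by omega, hc⟩]
      by_cases hir : i = r
      · rw [hir]
        rw [if_pos (show r = r ∧ c < w from ⟨rfl, hc⟩)]
        rw [if_pos (show grid.length - 1 - (m + 1) ≤ r ∧ c < w from ⟨by omega, hc⟩)]
        rw [hgrc, hgr1c, pvDown_of_lt grid c r hrh]
        by_cases hz : pvGetCell grid r c = 0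
        · simp only [hz, ne_eq, not_true_eq_false, if_false, true_and]
          by_cases hz2 : pvDown grid c (r + 1) = 0 <;> simp [hz2]
        · simp [hz]
      · rw [if_neg (fun h => hir h.1), ih3]
        by_cases hi : grid.length - 1 - m ≤ i
        · rw [if_pos ⟨hi, hc⟩, if_pos ⟨by omega, hc⟩]
        · rw [if_neg (fun h => hi h.1), if_neg (fun h => absurd h.1 (by omega))]
    · rw [if_neg (fun h => hc h.2), ih3, if_neg (fun h => hc h.2), if_neg (fun h => hc h.2)]

-- B's inner loop down column c, with the carry characterised as pvDown
theorem pv_colB_spec (grid : List (List Int)) (g : List (List Int)) (c : Nat) (m : Nat)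
    (hP : ∀ i, i < grid.length → (grid.headD []).length ≤ (grid.getD i []).length)
    (hc : c < (grid.headD []).length)
    (hl : g.length = grid.length)
    (hrl : ∀ i, (g.getD i []).length = (grid.getD i []).length)
    (hcol : ∀ i, pvGetCell g i c = pvGetCell grid i c)
    (hm : m ≤ grid.length) :
    ((List.range m).foldl (fun s k => pvStepB c s (grid.length - 1 - k)) (g, 0)).2 = pvDown grid c (grid.length - m) ∧
    ((List.range m).foldl (fun s k => pvStepB c s (grid.length - 1 - k)) (g, 0)).1.length = grid.length ∧
    (∀ i, (((List.range m).foldl (fun s k => pvStepB c s (grid.length - 1 - k)) (g, 0)).1.getD i []).length = (grid.getD i []).length) ∧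
    (∀ i c', pvGetCell ((List.range m).foldl (fun s k => pvStepB c s (grid.length - 1 - k)) (g, 0)).1 i c' =
      if c' = c ∧ grid.length - m ≤ i then pvDown grid c i else pvGetCell g i c') := by
  induction m with
  | zero =>
    refine ⟨by rw [pvDown_of_ge grid c _ (by omega)]; rfl, hl, hrl, ?_⟩
    intro i c'
    simp only [List.range_zero, List.foldl_nil]
    by_cases hcc : c' = c
    · by_cases hi : grid.length - 0 ≤ i
      · rw [if_pos ⟨hcc, hi⟩, pvDown_of_ge grid c i (by omega), hcc]
        have h1 : g.length ≤ i := by omega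
        simp [pvGetCell, List.getD_eq_getElem?_getD, List.getElem?_eq_none h1]
      · rw [if_neg (fun h => hi h.2)]
    · rw [if_neg (fun h => hcc h.1)]
  | succ m ih =>
    have hm' : m ≤ grid.length := by omega
    obtain ⟨ihc, ih1, ih2, ih3⟩ := ih hm'
    set F := (List.range m).foldl (fun s k => pvStepB c s (grid.length - 1 - k)) (g, 0)
      with hFdef
    set r := grid.length - 1 - m with hrdef
    have hrlen : grid.length - m = r + 1 := by omega
    have hrh : r < grid.length := by omega
    have hstep : (List.range (m + 1)).foldl (fun s k => pvStepB c s (grid.length - 1 - k)) (g, 0)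
        = pvStepB c F r := by
      rw [List.range_succ, List.foldl_append]; rfl
    have hv : pvGetCell F.1 r c = pvGetCell grid r c := by
      rw [ih3, if_neg (fun h => by omega), hcol r]
    have hbl : r < F.1.length := by rw [ih1]; exact hrh
    have hbc : c < (F.1.getD r []).length := by
      rw [ih2 r]; exact lt_of_lt_of_le hc (hP r hrh)
    have hdr : pvDown grid c (grid.length - (m + 1)) = pvDown grid c r := by
      rw [show grid.length - (m + 1) = r from by omega]
    rw [hstep]
    by_cases hz : pvGetCell grid r c = 0
    · have hbranch : pvStepB c F r = (pvSetCell F.1 r c F.2, F.2) := by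
        unfold pvStepB; rw [hv]; simp [hz]
      rw [hbranch]
      have hcarry : F.2 = pvDown grid c r := by
        rw [ihc, hrlen, pvDown_of_lt grid c r hrh]; simp [hz]
      refine ⟨?_, ?_, ?_, ?_⟩
      · rw [hdr, ← hcarry]
      · rw [pv_len_setCell, ih1]
      · intro i; rw [pv_rowlen_setCell, ih2 i]
      · intro i c'
        rw [pv_getCell_setCell]
        by_cases hir : r = i
        · by_cases hcc : c = c'
          · rw [if_pos ⟨hir, hcc, hbl, hbc⟩, if_pos ⟨hcc.symm, by omega⟩, ← hir, hcarry]
          · rw [if_neg (fun h => hcc h.2.1), ih3,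
              if_neg (fun h => hcc (h.1.symm)), if_neg (fun h => hcc (h.1.symm))]
        · rw [if_neg (fun h => hir h.1), ih3]
          by_cases hcc : c' = c
          · by_cases hi : grid.length - m ≤ i
            · rw [if_pos ⟨hcc, hi⟩, if_pos ⟨hcc, by omega⟩]
            · rw [if_neg (fun h => hi h.2), if_neg (fun h => absurd h.2 (by omega))]
          · rw [if_neg (fun h => hcc h.1), if_neg (fun h => hcc h.1)]
    · have hbranch : pvStepB c F r = (F.1, pvGetCell grid r c) := by
        unfold pvStepB; rw [hv]; simp [hz]
      rw [hbranch]
      have hdown : pvDown grid c r = pvGetCell grid r c := by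
        rw [pvDown_of_lt grid c r hrh]; simp [hz]
      refine ⟨by rw [hdr, hdown], ih1, ih2, ?_⟩
      intro i c'
      rw [ih3]
      by_cases hcc : c' = c
      · by_cases hi : grid.length - m ≤ i
        · rw [if_pos ⟨hcc, hi⟩, if_pos ⟨hcc, by omega⟩]
        · by_cases hir : i = r
          · rw [if_neg (fun h => hi h.2), if_pos ⟨hcc, by omega⟩, hir, hcc, hcol r, hdown]
          · rw [if_neg (fun h => hi h.2), if_neg (fun h => absurd h.2 (by omega))]
      · rw [if_neg (fun h => hcc h.1), if_neg (fun h => hcc h.1)]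

-- B's outer loop over columns
theorem pv_B_outer (grid : List (List Int)) (k : Nat)
    (hP : ∀ i, i < grid.length → (grid.headD []).length ≤ (grid.getD i []).length)
    (hk : k ≤ (grid.headD []).length) :
    ((List.range k).foldl (pvColB grid.length) grid).length = grid.length ∧
    (∀ i, (((List.range k).foldl (pvColB grid.length) grid).getD i []).length = (grid.getD i []).length) ∧
    (∀ i c, pvGetCell ((List.range k).foldl (pvColB grid.length) grid) i c =
      if c < k then pvDown grid c i else pvGetCell grid i c) := by
  induction k with
  | zero =>
    refine ⟨rfl, fun i => rfl, ?_⟩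
    intro i c
    rw [if_neg (by omega)]
    rfl
  | succ k ih =>
    have hk' : k ≤ (grid.headD []).length := by omega
    obtain ⟨ih1, ih2, ih3⟩ := ih hk'
    set g := (List.range k).foldl (pvColB grid.length) grid with hgdef
    have hstep : (List.range (k + 1)).foldl (pvColB grid.length) grid = pvColB grid.length g k := by
      rw [List.range_succ, List.foldl_append]; rfl
    have hcol : ∀ i, pvGetCell g i k = pvGetCell grid i k := by
      intro i; rw [ih3, if_neg (by omega)]
    obtain ⟨_, s1, s2, s3⟩ := pv_colB_spec grid g k grid.length hP (by omega) ih1 ih2 hcol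
      (le_refl _)
    refine ⟨by rw [hstep]; exact s1, fun i => by rw [hstep]; exact s2 i, ?_⟩
    intro i c
    rw [hstep]
    unfold pvColB
    rw [s3 i c]
    by_cases hcc : c = k
    · rw [if_pos ⟨hcc, by omega⟩, if_pos (by omega), hcc]
    · rw [if_neg (fun h => hcc h.1), ih3]
      by_cases hck : c < k
      · rw [if_pos hck, if_pos (by omega)]
      · rw [if_neg hck, if_neg (by omega)]

theorem pv_foldl_congr {α β : Type} (l : List β) (f g : α → β → α)
    (h : ∀ b ∈ l, ∀ a, f a b = g a b) : ∀ init, l.foldl f init = l.foldl g init := by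
  induction l with
  | nil => intro init; rfl
  | cons x xs ih =>
    intro init
    simp only [List.foldl_cons]
    rw [h x (by simp), ih (fun b hb a => h b (List.mem_cons_of_mem _ hb) a)]

-- the ports, rewritten through the proof-side loop bodies
theorem pv_extend_up_eq (grid : List (List Int)) (hg : ¬(grid = [] ∨ grid.headD [] = [])) :
    extend_up grid =
      (List.range (grid.length - 1)).foldl
        (fun g k => pvRowA (grid.headD []).length g (grid.length - 2 - k)) grid := by
  unfold extend_up
  rw [if_neg hg]
  simp only [PySem.List.pyRange_neg_one, List.foldl_map, List.map_id']
  rw [show (((grid.length : Int) - 2) - (-1)).toNat = grid.length - 1 from by omega]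
  apply pv_foldl_congr
  intro k hk g0
  have hk' : k < grid.length - 1 := List.mem_range.mp hk
  have ht : (((grid.length : Int) - 2) - (k : Int)).toNat = grid.length - 2 - k := by omega
  rw [PySem.List.pyRange_one]
  rw [show ((((grid.headD []).length : Int)) - 0).toNat = (grid.headD []).length from by simp]
  rw [List.foldl_map]
  unfold pvRowA pvStepA
  apply pv_foldl_congr
  intro c hc g1
  simp [ht]

theorem pv_extend_up_alt_eq (grid : List (List Int)) (hg : ¬(grid = [] ∨ grid.headD [] = [])) :
    extend_up_alt grid = (List.range (grid.headD []).length).foldl (pvColB grid.length) grid := by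
  unfold extend_up_alt
  rw [if_neg hg]
  simp only [List.map_id']
  rw [PySem.List.pyRange_one]
  rw [show ((((grid.headD []).length : Int)) - 0).toNat = (grid.headD []).length from by simp]
  rw [List.foldl_map]
  apply pv_foldl_congr
  intro c hc g0
  unfold pvColB pvStepB
  simp only [PySem.List.pyRange_neg_one, List.foldl_map]
  rw [show (((grid.length : Int) - 1) - (-1)).toNat = grid.length from by omega]
  have := pv_foldl_congr (List.range grid.length)
    (fun (s : List (List Int) × Int) k =>
      let v := pvGetCell s.1 (((grid.length : Int) - 1) - (k : Int)).toNat (0 + (c : Int)).toNat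
      if v ≠ 0 then (s.1, v)
      else (pvSetCell s.1 (((grid.length : Int) - 1) - (k : Int)).toNat (0 + (c : Int)).toNat s.2, s.2))
    (fun (s : List (List Int) × Int) k =>
      let v := pvGetCell s.1 (grid.length - 1 - k) c
      if v ≠ 0 then (s.1, v) else (pvSetCell s.1 (grid.length - 1 - k) c s.2, s.2))
    (by
      intro k hk a
      have hk' : k < grid.length := List.mem_range.mp hk
      have ht : (((grid.length : Int) - 1) - (k : Int)).toNat = grid.length - 1 - k := by omega
      simp [ht])
    (g0, 0)
  rw [this]

-- ===== VERDICT (by name: the statement is the Claim_ definition above) =====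
theorem extend_up_spec : Claim_equal_extend_up := by
  unfold Claim_equal_extend_up
  intro grid _ hpre
  unfold Spec_extend_up
  by_cases hg : grid = [] ∨ grid.headD [] = []
  · unfold extend_up extend_up_alt
    rw [if_pos hg, if_pos hg]
  · have hP : ∀ i, i < grid.length → (grid.headD []).length ≤ (grid.getD i []).length := by
      intro i hi
      have hmem : grid[i] ∈ grid := List.getElem_mem hi
      have h2 := hpre _ hmem
      simpa [List.getD_eq_getElem?_getD, List.getElem?_eq_getElem hi] using h2
    rw [pv_extend_up_eq grid hg, pv_extend_up_alt_eq grid hg]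
    obtain ⟨a1, a2, a3⟩ := pv_A_outer grid (grid.length - 1) hP (le_refl _)
    obtain ⟨b1, b2, b3⟩ := pv_B_outer grid (grid.headD []).length hP (le_refl _)
    apply pv_grid_eq_of_cells
    · rw [a1, b1]
    · intro i; rw [a2 i, b2 i]
    · intro i c
      rw [a3 i c, b3 i c]
      by_cases hc : c < (grid.headD []).length
      · rw [if_pos ⟨by omega, hc⟩, if_pos hc]
      · rw [if_neg (fun h => hc h.2), if_neg hc]
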